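-- pv_equiv track=rewrite | github.com/baldmer/cqa_kv-mem_oovkg | oov_approaches/oov_pca.py | search_in
-- ===== SOURCE A (Python) =====
-- def search_in(word_embeds, oov_entities):
--     """search oov entities with word embeddings"""
--
--     entity_label_found = {}
--
--     for ent, label in oov_entities.items():
--         label_cap = label.capitalize()
--         if label in word_embeds:
--             # single words
--             entity_label_found[ent] = label
--         elif label_cap in word_embeds:
--             # first character in capital
--             entity_label_found[ent] = label_cap
--         else:
--             # sentences (words_separated by _)
--             sentence = '_'.join(label.split(' '))
--             if sentence in word_embeds:
--                 entity_label_found[ent] = sentence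
--             else:
--                 # sentences of the form Word1_Word2
--                 words = label.split(" ")
--                 capitalized = []
--                 for word in words:
--                     capitalized.append(word.capitalize())
--
--                 sentence = "_".join(capitalized)
--
--                 if sentence in word_embeds:
--                     entity_label_found[ent] = sentence
--
--     return entity_label_found
-- ===== SOURCE B (Python) =====
-- def search_in(word_embeds, oov_entities):
--     """search oov entities with word embeddings"""
--     # staged sweeps, lowest-priority transformation first; a later (higher
--     # priority) sweep overwrites, so 'best' ends holding the first-matching
--     # candidate in A's priority order; output is rebuilt in oov order.
--     transforms = [
--         lambda l: '_'.join(w.capitalize() for w in l.split(' ')),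
--         lambda l: '_'.join(l.split(' ')),
--         lambda l: l.capitalize(),
--         lambda l: l,
--     ]
--     best = {}
--     for t in transforms:
--         for ent, label in oov_entities.items():
--             c = t(label)
--             if c in word_embeds:
--                 best[ent] = c
--     return {ent: best[ent] for ent in oov_entities if ent in best}
-- ===== Notes on version B (the rewrite author's own statement) =====
-- stated objective: alternative
-- what changed: A's entity-major nested if/elif cascade is replaced by a transformation-major algorithm: four whole-list sweeps in reverse priority order that overwrite a 'best' dict, followed by an assembly pass in oov order; priority is resolved by overwriting instead of branching.
import Mathlib
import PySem

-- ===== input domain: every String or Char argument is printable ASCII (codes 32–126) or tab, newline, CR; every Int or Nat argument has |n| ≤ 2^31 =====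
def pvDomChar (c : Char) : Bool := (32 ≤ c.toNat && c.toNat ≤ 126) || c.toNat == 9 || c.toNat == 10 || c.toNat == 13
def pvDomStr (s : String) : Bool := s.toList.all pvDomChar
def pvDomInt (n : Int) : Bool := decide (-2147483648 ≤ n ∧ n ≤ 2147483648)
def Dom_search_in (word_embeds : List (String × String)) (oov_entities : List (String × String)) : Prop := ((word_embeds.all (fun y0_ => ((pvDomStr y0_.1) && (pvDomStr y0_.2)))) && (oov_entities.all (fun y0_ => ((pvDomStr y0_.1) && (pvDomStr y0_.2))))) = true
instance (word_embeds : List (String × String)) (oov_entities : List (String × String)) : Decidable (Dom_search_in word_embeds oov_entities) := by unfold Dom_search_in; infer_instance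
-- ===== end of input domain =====

-- B replaces A's entity-major nested if/elif cascade by a transformation-major
-- algorithm: four whole-list sweeps in reverse priority order overwriting a 'best'
-- dict, then an assembly pass in oov order; objective: alternative. Return value only.

-- ===== shared string helpers (Python str ops on the ASCII domain) =====
-- Python str.capitalize(): first char upper-cased, rest lower-cased (exact on ASCII).
def pyCapitalize (s : String) : String :=
  match s.toList with
  | [] => ""
  | c :: r => String.ofList (PySem.Chars.upperChar c :: PySem.Chars.lower r)

-- label.split(' ') : exact via PySem.Chars.splitOn (separator nonempty)
def pySplitSpace (s : String) : List String :=
  (PySem.Chars.splitOn s.toList [' ']).map String.ofList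

-- ===== PORT A =====
-- the body of A's loop over oov_entities.items(), as a named step function
def stepA (we : PySem.Dict String String) (d : PySem.Dict String String) (p : String × String) : PySem.Dict String String :=
      let ent := p.1
      let label := p.2
      let label_cap := pyCapitalize label
      if we.contains label then d.insert ent label
      else if we.contains label_cap then d.insert ent label_cap
      else
        let sentence := PySem.Str.join "_" (pySplitSpace label)
        if we.contains sentence then d.insert ent sentence
        else
          let words := pySplitSpace label
          let capitalized := words.foldl (fun acc w => acc ++ [pyCapitalize w]) []
          let sentence2 := PySem.Str.join "_" capitalized
          if we.contains sentence2 then d.insert ent sentence2 else d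

def search_in (word_embeds : List (String × String)) (oov_entities : List (String × String)) : List (String × String) :=
  (((PySem.Dict.ofList oov_entities).items).foldl (stepA (PySem.Dict.ofList word_embeds)) PySem.Dict.empty).items

-- ===== PORT B =====
-- B's transformation list, lowest priority first (later sweeps overwrite)
def transformsB : List (String → String) :=
  [ fun l => PySem.Str.join "_" ((pySplitSpace l).map pyCapitalize),
    fun l => PySem.Str.join "_" (pySplitSpace l),
    pyCapitalize,
    fun l => l ]

-- the body of one sweep of B: insert (overwriting) when the candidate is in word_embeds
def passStep (we : PySem.Dict String String) (t : String → String)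
    (b : PySem.Dict String String) (p : String × String) : PySem.Dict String String :=
  let c := t p.2
  if we.contains c then b.insert p.1 c else b

def search_in_alt (word_embeds : List (String × String)) (oov_entities : List (String × String)) : List (String × String) :=
  let wed := PySem.Dict.ofList word_embeds
  let items := (PySem.Dict.ofList oov_entities).items
  let best := transformsB.foldl (fun b t => items.foldl (passStep wed t) b) PySem.Dict.empty
  -- final comprehension {ent: best[ent] for ent in oov_entities if ent in best}
  items.filterMap (fun p => (best.get? p.1).map (fun c => (p.1, c)))

-- ===== PRECONDITION & SPEC =====
def Spec_search_in (word_embeds : List (String × String)) (oov_entities : List (String × String)) (out : List (String × String)) : Prop := out = search_in_alt word_embeds oov_entities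
instance (word_embeds : List (String × String)) (oov_entities : List (String × String)) (out : List (String × String)) : Decidable (Spec_search_in word_embeds oov_entities out) := by unfold Spec_search_in; infer_instance

-- ===== CLAIM (what is proved, stated in full; the proofs are below) =====
def Claim_equal_search_in : Prop := ∀ (word_embeds : List (String × String)) (oov_entities : List (String × String)), Dom_search_in word_embeds oov_entities → Spec_search_in word_embeds oov_entities (search_in word_embeds oov_entities)

-- ===== LEMMAS AND PROOFS =====

-- the first candidate (in A's priority order) found in word_embeds, as a spec value
def firstMatch (we : PySem.Dict String String) (label : String) : Option String :=
  if we.contains label then some label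
  else if we.contains (pyCapitalize label) then some (pyCapitalize label)
  else if we.contains (PySem.Str.join "_" (pySplitSpace label)) then
    some (PySem.Str.join "_" (pySplitSpace label))
  else if we.contains (PySem.Str.join "_" ((pySplitSpace label).map pyCapitalize)) then
    some (PySem.Str.join "_" ((pySplitSpace label).map pyCapitalize))
  else none

lemma stepA_eq_firstMatch (we : PySem.Dict String String) (d : PySem.Dict String String)
    (p : String × String) :
    stepA we d p = match firstMatch we p.2 with
                   | some c => d.insert p.1 c
                   | none => d := by
  unfold stepA firstMatch
  simp only [PySem.List.foldl_append_singleton_eq_map, List.nil_append]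
  split_ifs <;> rfl

-- A's fold over fresh distinct keys appends exactly the matched pairs
lemma foldA_items (we : PySem.Dict String String) (items : List (String × String))
    (d : PySem.Dict String String)
    (hnd : (items.map (·.1)).Nodup)
    (hdisj : ∀ q ∈ items, d.contains q.1 = false) :
    (items.foldl (stepA we) d).items
      = d.items ++ items.filterMap (fun p => (firstMatch we p.2).map (fun c => (p.1, c))) := by
  induction items generalizing d with
  | nil => simp
  | cons p xs ih =>
    simp only [List.map_cons, List.nodup_cons] at hnd
    have hpd : d.contains p.1 = false := hdisj p (List.mem_cons_self)
    simp only [List.foldl_cons, List.filterMap_cons]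
    rw [stepA_eq_firstMatch]
    cases hfm : firstMatch we p.2 with
    | none =>
      simp only [Option.map_none]
      exact ih d hnd.2 (fun q hq => hdisj q (List.mem_cons_of_mem _ hq))
    | some c =>
      simp only [Option.map_some]
      have hdisj' : ∀ q ∈ xs, (d.insert p.1 c).contains q.1 = false := by
        intro q hq
        have hqk : q.1 ∈ xs.map (·.1) := List.mem_map_of_mem hq
        have hne : q.1 ≠ p.1 := fun h => hnd.1 (h ▸ hqk)
        rw [PySem.Dict.contains_insert, hdisj q (List.mem_cons_of_mem _ hq)]
        simp [hne]
      rw [ih (d.insert p.1 c) hnd.2 hdisj', PySem.Dict.items_insert_of_not_contains d c hpd,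
        List.append_assoc, List.singleton_append]

-- a sweep leaves keys not occurring in items untouched
lemma pass_get?_not_mem (we : PySem.Dict String String) (t : String → String)
    (items : List (String × String)) (b : PySem.Dict String String) (ent : String)
    (h : ent ∉ items.map (·.1)) :
    (items.foldl (passStep we t) b).get? ent = b.get? ent := by
  induction items generalizing b with
  | nil => rfl
  | cons p xs ih =>
    simp only [List.map_cons, List.mem_cons, not_or] at h
    simp only [List.foldl_cons]
    rw [ih _ h.2]
    show (if we.contains (t p.2) = true then b.insert p.1 (t p.2) else b).get? ent = b.get? ent
    split_ifs with hc
    · rw [PySem.Dict.get?_insert]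
      simp [h.1]
    · rfl

-- effect of one sweep on a key occurring in items (with distinct keys)
lemma pass_get?_mem (we : PySem.Dict String String) (t : String → String)
    (items : List (String × String)) (b : PySem.Dict String String)
    (ent label : String) (hnd : (items.map (·.1)).Nodup) (hmem : (ent, label) ∈ items) :
    (items.foldl (passStep we t) b).get? ent
      = if we.contains (t label) then some (t label) else b.get? ent := by
  induction items generalizing b with
  | nil => cases hmem
  | cons p xs ih =>
    simp only [List.map_cons, List.nodup_cons] at hnd
    simp only [List.foldl_cons]
    rcases List.mem_cons.mp hmem with heq | hxs
    · have hent : ent ∉ xs.map (·.1) := by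
        rw [← heq] at hnd; exact hnd.1
      rw [pass_get?_not_mem we t xs _ ent hent]
      rw [← heq]
      show (if we.contains (t label) = true then b.insert ent (t label) else b).get? ent
        = if we.contains (t label) then some (t label) else b.get? ent
      split_ifs with hc
      · rw [PySem.Dict.get?_insert]; simp
      · rfl
    · have hne : ent ≠ p.1 := by
        intro h
        exact hnd.1 (h ▸ List.mem_map_of_mem hxs)
      rw [ih _ hnd.2 hxs]
      have hb : (passStep we t b p).get? ent = b.get? ent := by
        show (if we.contains (t p.2) = true then b.insert p.1 (t p.2) else b).get? ent = b.get? ent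
        split_ifs with hc
        · rw [PySem.Dict.get?_insert]; simp [hne]
        · rfl
      rw [hb]

-- the four sweeps compute firstMatch for every entity of items
lemma best_get? (we : PySem.Dict String String) (items : List (String × String))
    (ent label : String) (hnd : (items.map (·.1)).Nodup) (hmem : (ent, label) ∈ items) :
    (transformsB.foldl (fun b t => items.foldl (passStep we t) b) PySem.Dict.empty).get? ent
      = firstMatch we label := by
  simp only [transformsB, List.foldl_cons, List.foldl_nil]
  rw [pass_get?_mem we _ items _ ent label hnd hmem,
      pass_get?_mem we _ items _ ent label hnd hmem,
      pass_get?_mem we _ items _ ent label hnd hmem,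
      pass_get?_mem we _ items _ ent label hnd hmem]
  unfold firstMatch
  split_ifs <;> simp [PySem.Dict.get?_empty]

-- ===== VERDICT (by name: the statement is the Claim_ definition above) =====
theorem search_in_spec : Claim_equal_search_in := by
  intro word_embeds oov_entities _
  unfold Spec_search_in search_in search_in_alt
  set wed := PySem.Dict.ofList word_embeds
  set items := (PySem.Dict.ofList oov_entities).items with hitems
  have hnd : (items.map (·.1)).Nodup := PySem.Dict.nodup_keys_ofList oov_entities
  rw [foldA_items wed items PySem.Dict.empty hnd
        (fun q _ => PySem.Dict.contains_empty q.1)]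
  have hemp : (PySem.Dict.empty : PySem.Dict String String).items = [] := rfl
  rw [hemp, List.nil_append]
  apply List.filterMap_congr
  intro p hp
  rw [best_get? wed items p.1 p.2 hnd (by exact hp)]
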